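-- pv_equiv track=rewrite | github.com/SamJohn04/leetcode-in-python | problem_1733.py | minimumTeachings
-- ===== SOURCE A (Python) =====
-- def minimumTeachings(n: int, languages: list[list[int]], friendships: list[list[int]]) -> int:
--     friends_cannot_talk = set()
--
--     for friends in friendships:
--         can_communicate = False
--         languages_of_first_friend = set(languages[friends[0] - 1])
--         for language in languages[friends[1] - 1]:
--             if language in languages_of_first_friend:
--                 can_communicate = True
--                 break
--         if not can_communicate:
--             friends_cannot_talk.add(friends[0] - 1)
--             friends_cannot_talk.add(friends[1] - 1)
--
--     max_already_know = 0
--     already_know = [0] * (n + 1)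
--     for friend in friends_cannot_talk:
--         for language in languages[friend]:
--             already_know[language] += 1
--             max_already_know = max(already_know[language], max_already_know)
--
--     return len(friends_cannot_talk) - max_already_know
-- ===== SOURCE B (Python) =====
-- def minimumTeachings(n: int, languages: list[list[int]], friendships: list[list[int]]) -> int:
--     failing = set()
--     for f in friendships:
--         u, v = f[0] - 1, f[1] - 1
--         if set(languages[u]).isdisjoint(languages[v]):
--             failing.add(u)
--             failing.add(v)
--     # teaching every failing user something is always enough, so start from that
--     # upper bound and take the cheapest single language to teach
--     best = len(failing)
--     for l in range(1, n + 1):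
--         cost = sum(1 for u in failing if l not in languages[u])
--         best = min(best, cost)
--     return best
-- ===== Notes on version B (the rewrite author's own statement) =====
-- stated objective: alternative
-- what changed: The second phase is re-decomposed: instead of one pass over the failing users accumulating per-language known-counts in a table while tracking a running max, B loops over each candidate language l = 1..n, counts the failing users who do not already know l (the cost of teaching them l), and keeps the minimum cost, starting from the upper bound len(failing); the first phase keeps the set of failing users but tests the friendship by set disjointness.
-- outside the precondition, e.g. on minimumTeachings(1, [[0], []], [[1, 2]]): A returns 1, B returns 2; on minimumTeachings(1, [[1, 1], []], [[1, 2]]): A returns 0, B returns 1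
import Mathlib
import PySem

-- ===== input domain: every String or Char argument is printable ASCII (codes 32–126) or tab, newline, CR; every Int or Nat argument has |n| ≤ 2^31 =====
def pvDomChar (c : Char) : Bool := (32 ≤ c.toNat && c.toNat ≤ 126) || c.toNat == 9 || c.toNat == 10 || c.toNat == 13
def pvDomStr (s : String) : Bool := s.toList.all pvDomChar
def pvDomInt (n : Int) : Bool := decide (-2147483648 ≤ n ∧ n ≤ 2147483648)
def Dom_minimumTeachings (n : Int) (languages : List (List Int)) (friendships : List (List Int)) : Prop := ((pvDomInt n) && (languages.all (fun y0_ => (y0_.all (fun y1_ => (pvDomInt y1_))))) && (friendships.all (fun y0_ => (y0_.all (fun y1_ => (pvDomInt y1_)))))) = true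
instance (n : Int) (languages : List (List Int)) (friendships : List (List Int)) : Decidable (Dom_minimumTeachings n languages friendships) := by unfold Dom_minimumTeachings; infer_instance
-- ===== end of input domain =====

-- B replaces A's second phase (per-language known-count accumulation with a running max over the
-- failing users' languages) by a loop over the candidate languages 1..n taking the minimum teaching
-- cost, starting from the upper bound len(failing); objective: alternative decomposition (not faster).

-- ===== PORT A =====
-- inner body of A's counting loop: already_know[language] += 1; max_already_know = max(...)
-- (pyGetD/pySetD are the total forms of Python's list indexing; exact under Pre_, which puts
--  every language id inside the already_know table and every friend index in range)
def pvStepA (st : List Int × Int) (language : Int) : List Int × Int :=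
  let v := PySem.List.pyGetD st.1 language 0 + 1
  (PySem.List.pySetD st.1 language v, max v st.2)

-- A's first loop: collect friends of failing friendships into a set
def pvFailingA (languages : List (List Int)) (friendships : List (List Int)) : PySem.Set Int :=
  friendships.foldl (fun s friends =>
    let f0 := PySem.List.pyGetD friends 0 0
    let f1 := PySem.List.pyGetD friends 1 0
    let langs1 := PySem.Set.ofList (PySem.List.pyGetD languages (f0 - 1) [])
    let canComm := (PySem.List.pyGetD languages (f1 - 1) []).any (fun language => langs1.contains language)
    if canComm then s
    else PySem.Set.add (PySem.Set.add s (f0 - 1)) (f1 - 1)) PySem.Set.empty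

def minimumTeachings (n : Int) (languages : List (List Int)) (friendships : List (List Int)) : Int :=
  let friendsCannotTalk := pvFailingA languages friendships
  let res := friendsCannotTalk.foldl
    (fun st friend => (PySem.List.pyGetD languages friend []).foldl pvStepA st)
    (List.replicate (n + 1).toNat 0, 0)
  PySem.Set.len friendsCannotTalk - res.2

-- ===== PORT B =====
-- B's first loop (disjointness test on the two language sets)
def pvFailingB (languages : List (List Int)) (friendships : List (List Int)) : PySem.Set Int :=
  friendships.foldl (fun s f =>
    let u := PySem.List.pyGetD f 0 0 - 1
    let v := PySem.List.pyGetD f 1 0 - 1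
    if PySem.Set.isdisjoint (PySem.Set.ofList (PySem.List.pyGetD languages u []))
        (PySem.List.pyGetD languages v []) then
      PySem.Set.add (PySem.Set.add s u) v
    else s) PySem.Set.empty

def minimumTeachings_alt (n : Int) (languages : List (List Int)) (friendships : List (List Int)) : Int :=
  let failing := pvFailingB languages friendships
  (PySem.List.pyRange 1 (n + 1) 1).foldl (fun best l =>
    let cost := (failing.map (fun u =>
      if (PySem.List.pyGetD languages u []).contains l then (0 : Int) else 1)).sum
    min best cost) (PySem.Set.len failing)

-- ===== PRECONDITION & SPEC =====
-- a well-formed language list: a duplicate-free list of language ids in 1..n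
def pvGoodLangs (n : Int) (L : List Int) : Prop := L.Nodup ∧ ∀ l ∈ L, 1 ≤ l ∧ l ≤ n

-- Pre_ restricts the inputs to the problem's stated domain: each friendship names two users whose
-- (1-based, possibly Python-negative) index is in range of `languages`, and whenever the two
-- users' language lists are disjoint (the friendship fails, so A indexes its counting table with
-- their language ids) both lists are duplicate-free lists of ids in 1..n.  Outside it A either
-- raises IndexError or returns a value produced by miscounting duplicate ids or by counting ids
-- outside 1..n (wrapped or id 0) as teachable languages — corners the problem statement rules out
-- (see the cites in the claim).
def Pre_minimumTeachings (n : Int) (languages : List (List Int)) (friendships : List (List Int)) : Prop :=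
  ∀ f ∈ friendships, 2 ≤ f.length ∧
    1 - (languages.length : Int) ≤ f.getD 0 0 ∧ f.getD 0 0 ≤ (languages.length : Int) ∧
    1 - (languages.length : Int) ≤ f.getD 1 0 ∧ f.getD 1 0 ≤ (languages.length : Int) ∧
    ((∀ l ∈ PySem.List.pyGetD languages (f.getD 0 0 - 1) [],
        l ∉ PySem.List.pyGetD languages (f.getD 1 0 - 1) []) →
      pvGoodLangs n (PySem.List.pyGetD languages (f.getD 0 0 - 1) []) ∧
      pvGoodLangs n (PySem.List.pyGetD languages (f.getD 1 0 - 1) []))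

instance (n : Int) (languages : List (List Int)) (friendships : List (List Int)) : Decidable (Pre_minimumTeachings n languages friendships) := by unfold Pre_minimumTeachings pvGoodLangs; infer_instance

def pvWitness_minimumTeachings : Int × List (List Int) × List (List Int) :=
  (2, [[1], [2]], [[1, 2]])

def Spec_minimumTeachings (n : Int) (languages : List (List Int)) (friendships : List (List Int)) (out : Int) : Prop := out = minimumTeachings_alt n languages friendships
instance (n : Int) (languages : List (List Int)) (friendships : List (List Int)) (out : Int) : Decidable (Spec_minimumTeachings n languages friendships out) := by unfold Spec_minimumTeachings; infer_instance

-- ===== CLAIM (what is proved, stated in full; the proofs are below) =====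
def Claim_equal_minimumTeachings : Prop := ∀ (n : Int) (languages : List (List Int)) (friendships : List (List Int)), Dom_minimumTeachings n languages friendships → Pre_minimumTeachings n languages friendships → Spec_minimumTeachings n languages friendships (minimumTeachings n languages friendships)

-- ===== LEMMAS AND PROOFS =====

theorem pv_failing_eq (languages friendships : List (List Int)) :
    pvFailingB languages friendships = pvFailingA languages friendships := by
  unfold pvFailingA pvFailingB
  apply PySem.List.foldl_congr_mem
  intro s f _
  simp only [PySem.Set.isdisjoint]
  have : (PySem.Set.ofList (PySem.List.pyGetD languages (PySem.List.pyGetD f 0 0 - 1) [])).any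
      (fun x => PySem.Set.contains (PySem.List.pyGetD languages (PySem.List.pyGetD f 1 0 - 1) []) x)
    = (PySem.List.pyGetD languages (PySem.List.pyGetD f 1 0 - 1) []).any
      (fun x => (PySem.Set.ofList (PySem.List.pyGetD languages (PySem.List.pyGetD f 0 0 - 1) [])).contains x) := by
    rw [Bool.eq_iff_iff]
    simp only [List.any_eq_true, PySem.Set.contains, List.contains_iff_mem,
      PySem.Set.mem_ofList]
    constructor
    · rintro ⟨x, hx1, hx2⟩
      exact ⟨x, hx2, by simpa [PySem.Set.mem_ofList] using hx1⟩
    · rintro ⟨x, hx1, hx2⟩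
      exact ⟨x, by simpa [PySem.Set.mem_ofList] using hx2, hx1⟩
  simp only [this]
  cases h : (PySem.List.pyGetD languages (PySem.List.pyGetD f 1 0 - 1) []).any
      (fun x => (PySem.Set.ofList (PySem.List.pyGetD languages (PySem.List.pyGetD f 0 0 - 1) [])).contains x) <;>
    simp

-- every member of the failing set is a friend index named by some friendship whose
-- communication test came out false

theorem pv_mem_failingA (languages friendships : List (List Int)) (x : Int) :
    x ∈ pvFailingA languages friendships →
    ∃ f ∈ friendships,
      (x = PySem.List.pyGetD f 0 0 - 1 ∨ x = PySem.List.pyGetD f 1 0 - 1) ∧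
      ((PySem.List.pyGetD languages (PySem.List.pyGetD f 1 0 - 1) []).any (fun language =>
        (PySem.Set.ofList (PySem.List.pyGetD languages (PySem.List.pyGetD f 0 0 - 1) [])).contains language)) = false := by
  unfold pvFailingA
  suffices h : ∀ (s : PySem.Set Int),
      x ∈ friendships.foldl (fun s friends =>
        let f0 := PySem.List.pyGetD friends 0 0
        let f1 := PySem.List.pyGetD friends 1 0
        let langs1 := PySem.Set.ofList (PySem.List.pyGetD languages (f0 - 1) [])
        let canComm := (PySem.List.pyGetD languages (f1 - 1) []).any (fun language => langs1.contains language)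
        if canComm then s
        else PySem.Set.add (PySem.Set.add s (f0 - 1)) (f1 - 1)) s →
      x ∈ s ∨ ∃ f ∈ friendships,
        (x = PySem.List.pyGetD f 0 0 - 1 ∨ x = PySem.List.pyGetD f 1 0 - 1) ∧
        ((PySem.List.pyGetD languages (PySem.List.pyGetD f 1 0 - 1) []).any (fun language =>
          (PySem.Set.ofList (PySem.List.pyGetD languages (PySem.List.pyGetD f 0 0 - 1) [])).contains language)) = false by
    intro hx
    rcases h PySem.Set.empty hx with h' | h'
    · exact absurd h' (by simp [PySem.Set.empty])
    · exact h'
  induction friendships with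
  | nil => intro s hx; exact Or.inl (by simpa using hx)
  | cons f T ih =>
    intro s hx
    simp only [List.foldl_cons] at hx
    rcases ih _ hx with h' | ⟨g, hg, hgx⟩
    · by_cases hc : ((PySem.List.pyGetD languages (PySem.List.pyGetD f 1 0 - 1) []).any
        (fun language => (PySem.Set.ofList (PySem.List.pyGetD languages (PySem.List.pyGetD f 0 0 - 1) [])).contains language)) = true
      · rw [if_pos hc] at h'
        exact Or.inl h'
      · rw [if_neg hc] at h'
        rcases (PySem.Set.mem_add _ _ _).1 h' with h'' | h''
        · rcases (PySem.Set.mem_add _ _ _).1 h'' with h3 | h3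
          · exact Or.inl h3
          · exact Or.inr ⟨f, by simp, Or.inl h3, Bool.eq_false_iff.2 hc⟩
        · exact Or.inr ⟨f, by simp, Or.inr h'', Bool.eq_false_iff.2 hc⟩
    · exact Or.inr ⟨g, by simp [hg], hgx⟩

theorem pv_getD_setD (xs : List Int) (i j v : Int) (hi0 : 0 ≤ i)
    (hj0 : 0 ≤ j) (hj : j < (xs.length : Int)) :
    PySem.List.pyGetD (PySem.List.pySetD xs i v) j 0 = if j = i then v else PySem.List.pyGetD xs j 0 := by
  rw [PySem.List.pySetD_of_nonneg xs v hi0,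
      PySem.List.pyGetD_eq_getElem _ 0 hj0 (by simpa using hj),
      PySem.List.pyGetD_eq_getElem _ 0 hj0 hj]
  rw [List.getElem_set]
  split_ifs with h1 h2 h2
  · rfl
  · exact absurd (by omega : j = i) h2
  · exact absurd (by omega : i.toNat = j.toNat) h1
  · rfl

theorem pv_countsA (L : List Int) (arr : List Int) (mx j : Int)
    (hL : ∀ l ∈ L, 0 ≤ l ∧ l < (arr.length : Int)) (hj0 : 0 ≤ j) (hj : j < (arr.length : Int)) :
    PySem.List.pyGetD (L.foldl pvStepA (arr, mx)).1 j 0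
      = PySem.List.pyGetD arr j 0 + (L.count j : Int) := by
  induction L generalizing arr mx with
  | nil => simp
  | cons a T ih =>
    have ha := hL a (by simp)
    simp only [List.foldl_cons, pvStepA]
    rw [ih _ _ (fun l hl => by
        have := hL l (by simp [hl])
        simpa [PySem.List.length_pySetD] using this)
      (by simpa [PySem.List.length_pySetD] using hj)]
    rw [pv_getD_setD arr a j _ ha.1 hj0 hj]
    simp only [List.count_cons, beq_iff_eq]
    by_cases hja : j = a
    · simp only [hja, if_true]
      push_cast
      omega
    · rw [if_neg hja, if_neg (fun h => hja h.symm)]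
      push_cast
      omega

theorem pv_foldmax_init {α : Type} (L : List α) (g : α → Int) (i j : Int) :
    L.foldl (fun m l => max m (g l)) (max i j) = max i (L.foldl (fun m l => max m (g l)) j) := by
  induction L generalizing j with
  | nil => simp
  | cons a T ih => simp only [List.foldl_cons, max_assoc, ih]

theorem pv_mxA (L : List Int) (arr : List Int) (mx : Int)
    (hL : ∀ l ∈ L, 0 ≤ l ∧ l < (arr.length : Int)) :
    (L.foldl pvStepA (arr, mx)).2
      = L.foldl (fun m l => max m (PySem.List.pyGetD (L.foldl pvStepA (arr, mx)).1 l 0)) mx := by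
  induction L generalizing arr mx with
  | nil => rfl
  | cons a T ih =>
    have ha := hL a (by simp)
    simp only [List.foldl_cons, pvStepA]
    have hT : ∀ l ∈ T, 0 ≤ l ∧ l <
        ((PySem.List.pySetD arr a (PySem.List.pyGetD arr a 0 + 1)).length : Int) := by
      intro l hl
      have := hL l (by simp [hl])
      simpa [PySem.List.length_pySetD] using this
    set v := PySem.List.pyGetD arr a 0 + 1 with hv
    set arr1 := PySem.List.pySetD arr a v with harr1
    set F := (T.foldl pvStepA (arr1, max v mx)).1 with hF
    set g : Int → Int := fun l => PySem.List.pyGetD F l 0 with hg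
    rw [ih arr1 (max v mx) hT]
    have hlen1 : (arr1.length : Int) = (arr.length : Int) := by
      simp [harr1, PySem.List.length_pySetD]
    have hga : g a = v + (T.count a : Int) := by
      rw [hg]
      simp only []
      rw [hF, pv_countsA T arr1 (max v mx) a hT ha.1 (by omega)]
      rw [harr1, pv_getD_setD arr a a v ha.1 ha.1 ha.2, if_pos rfl]
    by_cases hmem : a ∈ T
    · have hcnt : (0:Int) ≤ (T.count a : Int) := by positivity
      have hvle : v ≤ g a := by omega
      have H : T.foldl (fun m l => max m (g l)) v = T.foldl (fun m l => max m (g l)) (g a) := by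
        have h1 : T.foldl (fun m l => max m (g l)) (max (g a) v)
            = max (g a) (T.foldl (fun m l => max m (g l)) v) := pv_foldmax_init T g (g a) v
        rw [max_eq_left hvle] at h1
        rw [h1, max_eq_right ((PySem.List.le_foldl_max_int T g v).2 a hmem)]
      calc T.foldl (fun m l => max m (g l)) (max v mx)
          = T.foldl (fun m l => max m (g l)) (max mx v) := by rw [max_comm]
        _ = max mx (T.foldl (fun m l => max m (g l)) v) := pv_foldmax_init T g mx v
        _ = max mx (T.foldl (fun m l => max m (g l)) (g a)) := by rw [H]
        _ = T.foldl (fun m l => max m (g l)) (max mx (g a)) := (pv_foldmax_init T g mx (g a)).symm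
    · have : T.count a = 0 := List.count_eq_zero.2 hmem
      have hvga : v = g a := by rw [hga, this]; simp
      calc T.foldl (fun m l => max m (g l)) (max v mx)
          = T.foldl (fun m l => max m (g l)) (max mx v) := by rw [max_comm v mx]
        _ = max mx (T.foldl (fun m l => max m (g l)) v) := pv_foldmax_init T g mx v
        _ = max mx (T.foldl (fun m l => max m (g l)) (g a)) := by rw [hvga]
        _ = T.foldl (fun m l => max m (g l)) (max mx (g a)) := (pv_foldmax_init T g mx (g a)).symm

theorem pv_foldmax_le {α : Type} (L : List α) (g : α → Int) (b i : Int)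
    (hi : i ≤ b) (h : ∀ x ∈ L, g x ≤ b) : L.foldl (fun m l => max m (g l)) i ≤ b := by
  induction L generalizing i with
  | nil => simpa
  | cons a T ih =>
    simp only [List.foldl_cons]
    exact ih _ (max_le hi (h a (by simp))) (fun x hx => h x (by simp [hx]))

theorem pv_foldmin_eq {α : Type} (L : List α) (c : α → Int) (k m : Int) :
    L.foldl (fun b l => min b (k - c l)) (k - m) = k - L.foldl (fun m' l => max m' (c l)) m := by
  induction L generalizing m with
  | nil => simp
  | cons a T ih =>
    simp only [List.foldl_cons]
    rw [show min (k - m) (k - c a) = k - max m (c a) by omega, ih]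

theorem pv_foldmax_cover (L1 L2 : List Int) (c : Int → Int)
    (h1 : ∀ x ∈ L1, x ∈ L2) (h2 : ∀ x ∈ L2, c x = 0 ∨ x ∈ L1) :
    L1.foldl (fun m l => max m (c l)) 0 = L2.foldl (fun m l => max m (c l)) 0 := by
  apply le_antisymm
  · exact pv_foldmax_le _ _ _ _ (PySem.List.le_foldl_max_int L2 c 0).1
      (fun x hx => (PySem.List.le_foldl_max_int L2 c 0).2 x (h1 x hx))
  · refine pv_foldmax_le _ _ _ _ (PySem.List.le_foldl_max_int L1 c 0).1 (fun x hx => ?_)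
    rcases h2 x hx with h0 | hm
    · rw [h0]; exact (PySem.List.le_foldl_max_int L1 c 0).1
    · exact (PySem.List.le_foldl_max_int L1 c 0).2 x hm

theorem pv_costF (F : List Int) (langs : Int → List Int) (l : Int)
    (h : ∀ u ∈ F, (langs u).Nodup) :
    (F.map (fun u => if (langs u).contains l then (0 : Int) else 1)).sum
      = (F.length : Int) - ((F.flatMap langs).count l : Int) := by
  induction F with
  | nil => simp
  | cons u T ih =>
    have hnd : (langs u).Nodup := h u (by simp)
    have hcnt : ((langs u).count l : Int) = if (langs u).contains l then 1 else 0 := by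
      split_ifs with hm
      · rw [List.count_eq_one_of_mem hnd (by simpa using hm)]; norm_num
      · rw [List.count_eq_zero_of_not_mem (by simpa using hm)]; rfl
    rw [List.flatMap_cons, List.map_cons, List.sum_cons, List.count_append,
        ih (fun x hx => h x (by simp [hx]))]
    simp only [List.length_cons]
    push_cast
    split_ifs at hcnt ⊢ <;> omega

theorem pv_getD_replicate (k : Nat) (j : Int) :
    PySem.List.pyGetD (List.replicate k (0 : Int)) j 0 = 0 := by
  cases h : PySem.List.pyGet? (List.replicate k (0 : Int)) j with
  | none => simp [PySem.List.pyGetD, h]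
  | some x =>
    have hx : x ∈ List.replicate k (0:Int) := PySem.List.mem_of_pyGet?_eq_some (h := h)
    simp [PySem.List.pyGetD, h, List.eq_of_mem_replicate hx]

theorem pv_main (n : Int) (languages : List (List Int)) (friendships : List (List Int))
    (hPre : Pre_minimumTeachings n languages friendships) :
    minimumTeachings n languages friendships = minimumTeachings_alt n languages friendships := by
  have hfr := hPre
  simp only [minimumTeachings, minimumTeachings_alt, pv_failing_eq]
  set F := pvFailingA languages friendships with hFdef
  set langs : Int → List Int := fun u => PySem.List.pyGetD languages u [] with hlangs
  set flat : List Int := F.flatMap langs with hflatdef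
  set c : Int → Int := fun l => ((flat.count l : Nat) : Int) with hc
  -- every failing user is named by some failing friendship, whose two language lists are
  -- disjoint, so Pre_ makes both lists well formed
  have hFgood : ∀ u ∈ F, (langs u).Nodup ∧ ∀ l ∈ langs u, 1 ≤ l ∧ l ≤ n := by
    intro u hu
    obtain ⟨f, hf, hor, hcan⟩ := pv_mem_failingA languages friendships u hu
    obtain ⟨_, _, _, _, _, himp⟩ := hfr f hf
    have e0 : PySem.List.pyGetD f 0 0 = f.getD 0 0 := PySem.List.pyGetD_zero f 0
    have e1 : PySem.List.pyGetD f 1 0 = f.getD 1 0 := PySem.List.pyGetD_ofNat' f 1 0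
    rw [e0, e1] at hcan
    have hdisj : ∀ l ∈ PySem.List.pyGetD languages (f.getD 0 0 - 1) [],
        l ∉ PySem.List.pyGetD languages (f.getD 1 0 - 1) [] := by
      intro l hl0 hl1
      have := (List.any_eq_false).1 hcan l hl1
      simp only [PySem.Set.contains, Bool.not_eq_true] at this
      exact absurd (by simpa [PySem.Set.mem_ofList] using hl0 : l ∈ PySem.Set.ofList
        (PySem.List.pyGetD languages (f.getD 0 0 - 1) [])) (by simpa using this)
    obtain ⟨hg0, hg1⟩ := himp hdisj
    rcases hor with h | h
    · rw [hlangs]; rw [h, e0]; exact hg0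
    · rw [hlangs]; rw [h, e1]; exact hg1
  have hnd : ∀ u ∈ F, (langs u).Nodup := fun u hu => (hFgood u hu).1
  have hflatmem : ∀ l ∈ flat, 1 ≤ l ∧ l ≤ n := by
    intro l hl
    rw [hflatdef, List.mem_flatMap] at hl
    obtain ⟨u, hu, hlu⟩ := hl
    exact (hFgood u hu).2 l hlu
  -- ===== A side =====
  rw [← List.foldl_flatMap]
  have hvalid : ∀ l ∈ flat, 0 ≤ l ∧ l < ((List.replicate (n + 1).toNat (0:Int)).length : Int) := by
    intro l hl
    have := hflatmem l hl
    simp only [List.length_replicate]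
    omega
  rw [pv_mxA flat _ 0 hvalid]
  have hAfun : flat.foldl (fun m l => max m
        (PySem.List.pyGetD (flat.foldl pvStepA (List.replicate (n + 1).toNat 0, 0)).1 l 0)) 0
      = flat.foldl (fun m l => max m (c l)) 0 := by
    apply PySem.List.foldl_congr_mem
    intro acc l hl
    rw [pv_countsA flat _ 0 l hvalid (hvalid l hl).1 (hvalid l hl).2, pv_getD_replicate]
    simp [hc, hflatdef]
  rw [hAfun]
  -- ===== B side =====
  have hBfun : (PySem.List.pyRange 1 (n + 1) 1).foldl (fun best l =>
        min best ((F.map (fun u =>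
          if (PySem.List.pyGetD languages u []).contains l then (0 : Int) else 1)).sum))
        (PySem.Set.len F)
      = (PySem.List.pyRange 1 (n + 1) 1).foldl (fun best l =>
        min best ((F.length : Int) - c l)) ((F.length : Int) - 0) := by
    rw [show PySem.Set.len F = (F.length : Int) - 0 by simp [PySem.Set.len]]
    apply PySem.List.foldl_congr_mem
    intro acc l _
    rw [pv_costF F langs l hnd]
  rw [hBfun, pv_foldmin_eq]
  -- the two running maxes agree
  have hcover : flat.foldl (fun m l => max m (c l)) 0
      = (PySem.List.pyRange 1 (n + 1) 1).foldl (fun m l => max m (c l)) 0 := by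
    apply pv_foldmax_cover
    · intro x hx
      have := hflatmem x hx
      rw [PySem.List.mem_pyRange_one]
      omega
    · intro x _
      by_cases hm : x ∈ flat
      · exact Or.inr hm
      · exact Or.inl (by simp [hc, List.count_eq_zero.2 hm])
  rw [hcover, show PySem.Set.len F = (F.length : Int) from rfl]

-- ===== VERDICT (by name: the statement is the Claim_ definition above) =====
theorem minimumTeachings_spec : Claim_equal_minimumTeachings := by
  intro n languages friendships _ hPre
  unfold Spec_minimumTeachings
  exact pv_main n languages friendships hPre
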